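-- pv_equiv track=rewrite | github.com/ARTEAGA1811/PracticandoEjerciciosPython | semana30Agosto/gameOfLife3.py | generarMatrizFinal
-- ===== SOURCE A (Python) =====
-- def generarMatrizFinal(regVivas: dict, numFil, numCol):
--     nuevaMatriz = []
--     for i in range(numFil):
--         aux = ''
--         for k in range(numCol):
--             if(str(i)+','+str(k) in regVivas):
--                 aux+='*'
--             else:
--                 aux+='-'
--         nuevaMatriz.append(aux)
--     return nuevaMatriz
-- ===== SOURCE B (Python) =====
-- def generarMatrizFinal(regVivas: dict, numFil, numCol):
--     def fila(i):
--         pref = str(i) + ','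
--         vivas = {k[len(pref):] for k in regVivas if k.startswith(pref)}
--         return ''.join('*' if str(c) in vivas else '-' for c in range(numCol))
--     return [fila(i) for i in range(numFil)]
-- ===== Notes on version B (the rewrite author's own statement) =====
-- stated objective: alternative
-- what changed: Instead of constructing the key string str(i)+','+str(k) and testing dict membership for every cell, B builds per row a set of the suffixes of the keys that start with str(i)+',' and fills the row by testing str(k) against that set, assembling each row with filter/comprehension/join rather than character-by-character accumulation.
import Mathlib
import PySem

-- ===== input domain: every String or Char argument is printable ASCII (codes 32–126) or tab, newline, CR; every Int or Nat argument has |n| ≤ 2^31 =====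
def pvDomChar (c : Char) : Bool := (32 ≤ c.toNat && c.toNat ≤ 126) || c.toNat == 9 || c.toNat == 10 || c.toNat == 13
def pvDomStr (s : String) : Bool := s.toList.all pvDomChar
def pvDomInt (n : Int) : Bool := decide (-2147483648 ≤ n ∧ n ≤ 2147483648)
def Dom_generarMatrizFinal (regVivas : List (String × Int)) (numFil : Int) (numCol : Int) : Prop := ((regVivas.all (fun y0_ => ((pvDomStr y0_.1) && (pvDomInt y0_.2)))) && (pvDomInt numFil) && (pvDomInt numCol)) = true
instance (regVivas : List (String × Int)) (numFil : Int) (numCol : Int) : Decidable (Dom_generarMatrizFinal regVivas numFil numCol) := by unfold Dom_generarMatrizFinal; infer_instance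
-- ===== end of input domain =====

-- B replaces A's per-cell construction of the key string by a per-row set of suffixes of the
-- matching keys (objective: alternative decomposition); equal return values, no side effects.

-- ===== PORT A =====
-- Python strings are modelled as List Char (PySem.Chars), wrapped with String.ofList on append to the result list.
def generarMatrizFinal (regVivas : List (String × Int)) (numFil : Int) (numCol : Int) : List String :=
  (PySem.List.pyRange 0 numFil 1).foldl (fun nuevaMatriz i =>
    nuevaMatriz ++ [String.ofList ((PySem.List.pyRange 0 numCol 1).foldl (fun aux k =>
      if regVivas.any (fun p => p.1.toList == PySem.Int.toChars i ++ ',' :: PySem.Int.toChars k)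
      then aux ++ ['*'] else aux ++ ['-']) [])]) []

-- ===== PORT B =====
def pvFilaAlt (regVivas : List (String × Int)) (numCol : Int) (i : Int) : String :=
  let pref : List Char := PySem.Int.toChars i ++ [',']
  let vivas : PySem.Set (List Char) := PySem.Set.ofList
    (((regVivas.map (fun p => p.1.toList)).filter (fun k => PySem.Chars.startswith k pref)).map
      (fun k => PySem.Chars.slice k (some (pref.length : Int)) none))
  String.ofList (PySem.Chars.join [] ((PySem.List.pyRange 0 numCol 1).map
    (fun c => if PySem.Set.contains vivas (PySem.Int.toChars c) then ['*'] else ['-'])))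

def generarMatrizFinal_alt (regVivas : List (String × Int)) (numFil : Int) (numCol : Int) : List String :=
  (PySem.List.pyRange 0 numFil 1).map (pvFilaAlt regVivas numCol)

-- ===== PRECONDITION & SPEC =====
def Spec_generarMatrizFinal (regVivas : List (String × Int)) (numFil : Int) (numCol : Int) (out : List String) : Prop := out = generarMatrizFinal_alt regVivas numFil numCol
instance (regVivas : List (String × Int)) (numFil : Int) (numCol : Int) (out : List String) : Decidable (Spec_generarMatrizFinal regVivas numFil numCol out) := by unfold Spec_generarMatrizFinal; infer_instance

-- ===== CLAIM (what is proved, stated in full; the proofs are below) =====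
def Claim_equal_generarMatrizFinal : Prop := ∀ (regVivas : List (String × Int)) (numFil : Int) (numCol : Int), Dom_generarMatrizFinal regVivas numFil numCol → Spec_generarMatrizFinal regVivas numFil numCol (generarMatrizFinal regVivas numFil numCol)

-- ===== LEMMAS AND PROOFS =====

-- A's inner loop: append '*' or '-' per cell = map over the cells.
theorem pv_foldl_if_append {α β : Type} (p : α → Bool) (a b : β) :
    ∀ (l : List α) (acc : List β),
      l.foldl (fun acc x => if p x then acc ++ [a] else acc ++ [b]) acc
        = acc ++ l.map (fun x => if p x then a else b) := by
  intro l
  induction l with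
  | nil => simp
  | cons x xs ih =>
    intro acc
    by_cases h : p x = true <;> simp [List.foldl_cons, h, ih]

-- The per-cell test of A equals B's per-row suffix-set membership test.
theorem pv_cell_eq (regVivas : List (String × Int)) (i k : Int) :
    (regVivas.any (fun p => p.1.toList == PySem.Int.toChars i ++ ',' :: PySem.Int.toChars k))
      = PySem.Set.contains (PySem.Set.ofList
          (((regVivas.map (fun p => p.1.toList)).filter
              (fun s => PySem.Chars.startswith s (PySem.Int.toChars i ++ [',']))).map
            (fun s => PySem.Chars.slice s (some (((PySem.Int.toChars i ++ [',']).length : Nat) : Int)) none)))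
          (PySem.Int.toChars k) := by
  set pref : List Char := PySem.Int.toChars i ++ [','] with hpref
  rw [Bool.eq_iff_iff, List.any_eq_true, PySem.Set.contains_iff, PySem.Set.mem_ofList]
  simp only [List.mem_map, List.mem_filter, PySem.Chars.startswith_iff, beq_iff_eq]
  have hslice : ∀ l : List Char,
      PySem.Chars.slice l (some ((pref.length : Nat) : Int)) none = l.drop pref.length := by
    intro l; simp [PySem.Chars.slice, PySem.List.slice_from_natCast]
  constructor
  · rintro ⟨p, hp, hkey⟩
    refine ⟨p.1.toList, ⟨⟨p, hp, rfl⟩, ?_⟩, ?_⟩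
    · rw [hkey, hpref]
      exact ⟨PySem.Int.toChars k, by simp⟩
    · rw [hslice, hkey, hpref]
      have : PySem.Int.toChars i ++ ',' :: PySem.Int.toChars k
          = (PySem.Int.toChars i ++ [',']) ++ PySem.Int.toChars k := by simp
      rw [this, List.drop_left]
  · rintro ⟨s, ⟨⟨p, hp, rfl⟩, hpre⟩, hdrop⟩
    obtain ⟨t, ht⟩ := hpre
    refine ⟨p, hp, ?_⟩
    rw [hslice, ← ht, List.drop_left] at hdrop
    rw [← ht, hdrop, hpref]
    simp

-- ===== VERDICT (by name: the statement is the Claim_ definition above) =====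
theorem generarMatrizFinal_spec : Claim_equal_generarMatrizFinal := by
  intro regVivas numFil numCol _
  show generarMatrizFinal regVivas numFil numCol = generarMatrizFinal_alt regVivas numFil numCol
  unfold generarMatrizFinal generarMatrizFinal_alt
  rw [PySem.List.foldl_append_singleton_eq_map, List.nil_append]
  refine List.map_congr_left (fun i _ => ?_)
  unfold pvFilaAlt
  rw [pv_foldl_if_append, List.nil_append]
  congr 1
  have hsing : ∀ (l : List Int) (q : Int → Bool),
      PySem.Chars.join [] (l.map (fun c => if q c then ['*'] else ['-']))
        = l.map (fun c => if q c then '*' else '-') := by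
    intro l q
    have : (l.map (fun c => if q c then ['*'] else ['-']))
        = (l.map (fun c => if q c then '*' else '-')).map (fun c => [c]) := by
      rw [List.map_map]
      exact List.map_congr_left (fun c _ => by by_cases h : q c = true <;> simp [h])
    rw [this, PySem.Chars.join_nil_singletons]
  rw [hsing]
  exact List.map_congr_left (fun k _ => by rw [pv_cell_eq])
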